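-- pv_equiv track=rewrite | github.com/MK-Ware/Forensic-Tools | exif_extractor.py | getImgName
-- ===== SOURCE A (Python) =====
-- def getImgName(full_path):
--     x = 0
--     for i in range(len(full_path)):
--         if full_path[i] in ("\\", "/"):
--             x = i
--
--     if any(char in full_path for char in ("\\", "/")):
--         x += 1
--     return full_path[x:]
-- ===== SOURCE B (Python) =====
-- def getImgName(full_path):
--     # scan from the end, stop at the first separator seen
--     name = []
--     for ch in reversed(full_path):
--         if ch in ("\\", "/"):
--             break
--         name.append(ch)
--     return "".join(reversed(name))
-- ===== Notes on version B (the rewrite author's own statement) =====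
-- stated objective: alternative
-- what changed: B scans the path backwards from the end and stops at the first separator, collecting the filename's characters, instead of A's forward pass over every index plus a second membership pass and a slice.
import Mathlib
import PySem

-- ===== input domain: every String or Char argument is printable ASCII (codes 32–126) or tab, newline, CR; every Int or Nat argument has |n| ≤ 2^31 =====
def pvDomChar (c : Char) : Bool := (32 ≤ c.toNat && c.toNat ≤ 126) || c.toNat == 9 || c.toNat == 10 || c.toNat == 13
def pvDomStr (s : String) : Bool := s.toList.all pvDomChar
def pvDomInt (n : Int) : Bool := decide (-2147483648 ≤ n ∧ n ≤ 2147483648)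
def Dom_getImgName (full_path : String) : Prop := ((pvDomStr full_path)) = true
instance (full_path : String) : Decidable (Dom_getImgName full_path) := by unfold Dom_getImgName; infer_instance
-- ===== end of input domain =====

-- B scans the path from the END and stops at the first separator (early exit),
-- instead of A's forward scan over every index; objective: simpler/alternative.

-- ===== PORT A =====
-- A's forward loop: remember the index of the LAST separator seen.
def getImgNameFold (cs : List Char) : Int :=
  (PySem.List.pyRange 0 cs.length 1).foldl
    (fun x i =>
      match PySem.List.pyGet? cs i with
      | some c => if c = '\\' ∨ c = '/' then i else x
      | none => x) 0

def getImgName (full_path : String) : String :=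
  let cs := full_path.toList
  let x : Int := getImgNameFold cs
  let x : Int :=
    if PySem.Chars.isIn ['\\'] cs ∨ PySem.Chars.isIn ['/'] cs then x + 1 else x
  String.ofList (PySem.List.slice cs (some x) none)

-- ===== PORT B =====
-- B's backward loop with break: collect characters until a separator is met.
def getImgNameAltGo : List Char → List Char
  | [] => []
  | c :: rest => if c = '\\' ∨ c = '/' then [] else c :: getImgNameAltGo rest

def getImgName_alt (full_path : String) : String :=
  String.ofList ((getImgNameAltGo full_path.toList.reverse).reverse)

-- ===== PRECONDITION & SPEC =====
def Spec_getImgName (full_path : String) (out : String) : Prop := out = getImgName_alt full_path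
instance (full_path : String) (out : String) : Decidable (Spec_getImgName full_path out) := by unfold Spec_getImgName; infer_instance

-- ===== CLAIM (what is proved, stated in full; the proofs are below) =====
def Claim_equal_getImgName : Prop := ∀ (full_path : String), Dom_getImgName full_path → Spec_getImgName full_path (getImgName full_path)

-- ===== LEMMAS AND PROOFS =====

theorem getImgNameFold_append (xs : List Char) (c : Char) :
    getImgNameFold (xs ++ [c]) =
      if c = '\\' ∨ c = '/' then (xs.length : Int) else getImgNameFold xs := by
  unfold getImgNameFold
  have hsplit : PySem.List.pyRange 0 ((xs ++ [c]).length) 1 =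
      PySem.List.pyRange 0 xs.length 1 ++ PySem.List.pyRange xs.length ((xs ++ [c]).length) 1 := by
    exact PySem.List.pyRange_one_append 0 xs.length _ (by positivity) (by simp)
  rw [hsplit, List.foldl_append]
  have hlast : PySem.List.pyRange (xs.length : Int) ((xs ++ [c]).length) 1 = [(xs.length : Int)] := by
    rw [PySem.List.pyRange_one]
    simp [List.length_append]
  have hcongr : ∀ (init : Int),
      (PySem.List.pyRange 0 xs.length 1).foldl
        (fun x i =>
          match PySem.List.pyGet? (xs ++ [c]) i with
          | some c => if c = '\\' ∨ c = '/' then i else x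
          | none => x) init =
      (PySem.List.pyRange 0 xs.length 1).foldl
        (fun x i =>
          match PySem.List.pyGet? xs i with
          | some c => if c = '\\' ∨ c = '/' then i else x
          | none => x) init := by
    intro init
    apply PySem.List.foldl_congr_mem
    intro acc i hi
    have h := PySem.List.mem_pyRange_one.mp hi
    have hget : PySem.List.pyGet? (xs ++ [c]) i = PySem.List.pyGet? xs i := by
      rw [PySem.List.pyGet?_of_nonneg _ h.1, PySem.List.pyGet?_of_nonneg _ h.1]
      have hlt : i.toNat < xs.length := by omega
      rw [List.getElem?_append_left hlt]
    rw [hget]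
  rw [hcongr, hlast]
  simp only [List.foldl_cons, List.foldl_nil, PySem.List.pyGet?_append_length]

theorem getImgNameFold_of_no_sep (xs : List Char) (h1 : '\\' ∉ xs) (h2 : '/' ∉ xs) :
    getImgNameFold xs = 0 := by
  induction xs using List.reverseRecOn with
  | nil => rfl
  | append_singleton ys c ih =>
    rw [getImgNameFold_append]
    simp only [List.mem_append, List.mem_singleton] at h1 h2
    push Not at h1 h2
    rw [if_neg (by tauto)]
    exact ih h1.1 h2.1

theorem getImgNameFold_bounds (xs : List Char) (h : '\\' ∈ xs ∨ '/' ∈ xs) :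
    0 ≤ getImgNameFold xs ∧ getImgNameFold xs < (xs.length : Int) := by
  induction xs using List.reverseRecOn with
  | nil => simp at h
  | append_singleton ys c ih =>
    rw [getImgNameFold_append]
    by_cases hc : c = '\\' ∨ c = '/'
    · rw [if_pos hc]; constructor <;> simp
    · rw [if_neg hc]
      have hmem : '\\' ∈ ys ∨ '/' ∈ ys := by
        have hc1 : ¬ ('\\' = c) := fun hx => hc (Or.inl hx.symm)
        have hc2 : ¬ ('/' = c) := fun hx => hc (Or.inr hx.symm)
        simp only [List.mem_append, List.mem_singleton] at h
        tauto
      have := ih hmem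
      constructor
      · exact this.1
      · have : getImgNameFold ys < (ys.length : Int) := this.2
        simp only [List.length_append, List.length_singleton]
        push_cast; omega

theorem isIn_single_iff (a : Char) (s : List Char) :
    PySem.Chars.isIn [a] s = true ↔ a ∈ s := by
  rw [PySem.Chars.isIn_iff_infix]
  exact List.singleton_infix_iff a s

-- A's whole body, on the char list
theorem getImgName_core (cs : List Char) :
    PySem.List.slice cs
        (some (if PySem.Chars.isIn ['\\'] cs ∨ PySem.Chars.isIn ['/'] cs
               then getImgNameFold cs + 1 else getImgNameFold cs)) none =
      (getImgNameAltGo cs.reverse).reverse := by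
  induction cs using List.reverseRecOn with
  | nil => rfl
  | append_singleton xs c ih =>
    by_cases hc : c = '\\' ∨ c = '/'
    · -- last char is a separator: A drops everything, B stops at once
      have hin : PySem.Chars.isIn ['\\'] (xs ++ [c]) ∨ PySem.Chars.isIn ['/'] (xs ++ [c]) := by
        rcases hc with hc | hc
        · left; rw [isIn_single_iff]; simp [hc]
        · right; rw [isIn_single_iff]; simp [hc]
      rw [if_pos hin, getImgNameFold_append, if_pos hc]
      have hx : ((xs.length : Int) + 1) = (((xs.length + 1 : Nat)) : Int) := by push_cast; ring
      rw [hx, PySem.List.slice_from_natCast]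
      simp [getImgNameAltGo, hc]
    · -- last char is not a separator: both keep c and recurse on xs
      have hfold : getImgNameFold (xs ++ [c]) = getImgNameFold xs := by
        rw [getImgNameFold_append, if_neg hc]
      have hiff : (PySem.Chars.isIn ['\\'] (xs ++ [c]) = true ∨ PySem.Chars.isIn ['/'] (xs ++ [c]) = true)
          ↔ (PySem.Chars.isIn ['\\'] xs = true ∨ PySem.Chars.isIn ['/'] xs = true) := by
        have hc1 : ¬ ('\\' = c) := fun h => hc (Or.inl h.symm)
        have hc2 : ¬ ('/' = c) := fun h => hc (Or.inr h.symm)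
        simp only [isIn_single_iff, List.mem_append, List.mem_singleton]
        tauto
      have hrev : (getImgNameAltGo (xs ++ [c]).reverse).reverse =
          (getImgNameAltGo xs.reverse).reverse ++ [c] := by
        rw [List.reverse_append]
        simp [getImgNameAltGo, hc]
      rw [hfold, hrev]
      by_cases hin : PySem.Chars.isIn ['\\'] xs = true ∨ PySem.Chars.isIn ['/'] xs = true
      · rw [if_pos (hiff.mpr hin)]
        rw [if_pos hin] at ih
        have hmem : '\\' ∈ xs ∨ '/' ∈ xs := by
          rcases hin with h | h
          · exact Or.inl ((isIn_single_iff _ _).mp h)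
          · exact Or.inr ((isIn_single_iff _ _).mp h)
        obtain ⟨h0, hlt⟩ := getImgNameFold_bounds xs hmem
        have hk : getImgNameFold xs + 1 = (((getImgNameFold xs + 1).toNat : Nat) : Int) := by omega
        have hkle : (getImgNameFold xs + 1).toNat ≤ xs.length := by omega
        rw [hk, PySem.List.slice_from_natCast] at ih ⊢
        rw [List.drop_append_of_le_length hkle, ih]
      · rw [if_neg ((not_congr hiff).mpr hin)]
        rw [if_neg hin] at ih
        have h0 : getImgNameFold xs = 0 := by
          apply getImgNameFold_of_no_sep
          · intro h; exact hin (Or.inl ((isIn_single_iff _ _).mpr h))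
          · intro h; exact hin (Or.inr ((isIn_single_iff _ _).mpr h))
        rw [h0] at ih ⊢
        have hz : (0 : Int) = ((0 : Nat) : Int) := rfl
        rw [hz, PySem.List.slice_from_natCast] at ih ⊢
        rw [List.drop_append_of_le_length (by omega), ih]

-- final assembly

theorem getImgName_spec : Claim_equal_getImgName := by
  intro fp _
  unfold Spec_getImgName getImgName getImgName_alt
  simp only
  exact congrArg String.ofList (getImgName_core fp.toList)
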